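-- pv_equiv track=rewrite | github.com/ryangerardwilson/py | main.py | prepend_unique
-- ===== SOURCE A (Python) =====
-- from typing import Iterable
--
-- def prepend_unique(path_parts: Iterable[str], first: str) -> list[str]:
--     seen: set[str] = set()
--     result: list[str] = []
--     for part in [first, *path_parts]:
--         if not part or part in seen:
--             continue
--         seen.add(part)
--         result.append(part)
--     return result
-- ===== SOURCE B (Python) =====
-- def prepend_unique(path_parts, first):
--     pending = [p for p in [first, *path_parts] if p]
--     result = []
--     while pending:
--         head = pending[0]
--         result.append(head)
--         pending = [p for p in pending[1:] if p != head]
--     return result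
-- ===== Notes on version B (the rewrite author's own statement) =====
-- stated objective: alternative
-- what changed: Replaces A's single pass with a maintained seen-set by two stages: first drop the empty strings, then dedup by repeatedly emitting the head and filtering every later copy of it out of the remaining tail, so no seen structure exists at all.
import Mathlib
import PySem

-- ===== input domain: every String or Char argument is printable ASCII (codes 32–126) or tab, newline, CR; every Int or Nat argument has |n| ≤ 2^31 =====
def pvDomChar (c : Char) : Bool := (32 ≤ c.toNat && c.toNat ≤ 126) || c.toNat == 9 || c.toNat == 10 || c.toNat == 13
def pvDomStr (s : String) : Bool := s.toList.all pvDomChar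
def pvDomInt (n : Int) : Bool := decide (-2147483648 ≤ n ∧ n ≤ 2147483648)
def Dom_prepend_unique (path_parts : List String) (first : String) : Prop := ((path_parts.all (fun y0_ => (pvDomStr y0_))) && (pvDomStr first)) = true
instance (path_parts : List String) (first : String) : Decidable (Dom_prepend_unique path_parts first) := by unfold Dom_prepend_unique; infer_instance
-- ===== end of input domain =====

-- B replaces A's seen-set single pass by two stages: drop empties, then dedup by
-- repeatedly emitting the head and filtering its later copies out of the tail
-- (alternative decomposition, not faster; return value only, no mutation).

-- ===== PORT A =====
def prepend_unique (path_parts : List String) (first : String) : List String :=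
  let st := (first :: path_parts).foldl
    (fun (st : PySem.Set String × List String) part =>
      if part = "" ∨ PySem.Set.contains st.1 part then st
      else (PySem.Set.add st.1 part, st.2 ++ [part]))
    (PySem.Set.empty, [])
  st.2

-- ===== PORT B =====
-- the while-loop of Source B: emit the head, filter it out of the rest, repeat
def pvHeadFilterDedup : List String → List String
  | [] => []
  | head :: rest =>
    head :: pvHeadFilterDedup (rest.filter (fun p => !(p == head)))
termination_by l => l.length
decreasing_by
  have h := List.length_filter_le (fun x : {x // x ∈ rest} => !(x.1 == head)) rest.attach
  simp at h ⊢
  omega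

def prepend_unique_alt (path_parts : List String) (first : String) : List String :=
  pvHeadFilterDedup ((first :: path_parts).filter (fun p => !(p == "")))

-- ===== PRECONDITION & SPEC =====
def Spec_prepend_unique (path_parts : List String) (first : String) (out : List String) : Prop := out = prepend_unique_alt path_parts first
instance (path_parts : List String) (first : String) (out : List String) : Decidable (Spec_prepend_unique path_parts first out) := by unfold Spec_prepend_unique; infer_instance

-- ===== CLAIM (what is proved, stated in full; the proofs are below) =====
def Claim_equal_prepend_unique : Prop := ∀ (path_parts : List String) (first : String), Dom_prepend_unique path_parts first → Spec_prepend_unique path_parts first (prepend_unique path_parts first)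

-- ===== LEMMAS AND PROOFS =====

-- Invariant: A's loop over the remaining list L, with seen-set `seen` and accumulated
-- result `res`, produces `res ++` B's head-filter dedup of L restricted to the
-- nonempty, not-yet-seen elements.
theorem pv_loop_eq (L : List String) : ∀ (seen : PySem.Set String) (res : List String),
    (L.foldl
      (fun (st : PySem.Set String × List String) part =>
        if part = "" ∨ PySem.Set.contains st.1 part then st
        else (PySem.Set.add st.1 part, st.2 ++ [part]))
      (seen, res)).2
    = res ++ pvHeadFilterDedup
        (L.filter (fun p => !(p == "") && !(PySem.Set.contains seen p))) := by
  induction L with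
  | nil => intro seen res; simp [pvHeadFilterDedup]
  | cons p rest ih =>
    intro seen res
    by_cases hskip : p = "" ∨ PySem.Set.contains seen p = true
    · have hfp : ¬ ((!(p == "") && !(PySem.Set.contains seen p)) = true) := by
        rcases hskip with h | h
        · simp [h]
        · rw [h]; simp
      rw [List.foldl_cons, if_pos hskip, List.filter_cons, if_neg hfp]
      exact ih seen res
    · have hp : p ≠ "" := fun h => hskip (Or.inl h)
      have hseen' : PySem.Set.contains seen p = false := by
        rcases Bool.eq_false_or_eq_true (PySem.Set.contains seen p) with h | h <;>
          first | exact h | exact absurd (Or.inr h) hskip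
      have hfp : (!(p == "") && !(PySem.Set.contains seen p)) = true := by
        rw [hseen']; simp [hp]
      rw [List.foldl_cons, if_neg hskip, List.filter_cons, if_pos hfp,
        ih (PySem.Set.add seen p) (res ++ [p])]
      have hfilters :
          (rest.filter (fun q => !(q == "") && !(PySem.Set.contains (PySem.Set.add seen p) q)))
          = (rest.filter (fun q => !(q == "") && !(PySem.Set.contains seen q))).filter
              (fun q => !(q == p)) := by
        rw [List.filter_filter]
        apply List.filter_congr
        intro q _
        by_cases hq : q = p
        · subst hq
          have hc : PySem.Set.contains (PySem.Set.add seen q) q = true := by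
            rw [PySem.Set.contains_iff, PySem.Set.mem_add]; tauto
          rw [hc]; simp
        · have hc : PySem.Set.contains (PySem.Set.add seen p) q
              = PySem.Set.contains seen q := by
            by_cases hmem : q ∈ seen
            · have h1 : PySem.Set.contains seen q = true :=
                (PySem.Set.contains_iff _ _).mpr hmem
              have h2 : PySem.Set.contains (PySem.Set.add seen p) q = true := by
                rw [PySem.Set.contains_iff, PySem.Set.mem_add]; exact Or.inl hmem
              rw [h1, h2]
            · have h1 : PySem.Set.contains seen q = false := by
                rw [Bool.eq_false_iff]
                intro hc2; exact hmem ((PySem.Set.contains_iff _ _).mp hc2)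
              have h2 : PySem.Set.contains (PySem.Set.add seen p) q = false := by
                rw [Bool.eq_false_iff]
                intro hc2
                rcases (PySem.Set.mem_add _ _ _).mp ((PySem.Set.contains_iff _ _).mp hc2) with hm | hm
                · exact hmem hm
                · exact hq hm
              rw [h1, h2]
          rw [hc]
          have hqp : (q == p) = false := by simp [hq]
          rw [hqp]
          simp
      rw [hfilters, pvHeadFilterDedup]
      simp

-- ===== VERDICT (by name: the statement is the Claim_ definition above) =====
theorem prepend_unique_spec : Claim_equal_prepend_unique := by
  intro path_parts first _
  unfold Spec_prepend_unique prepend_unique prepend_unique_alt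
  rw [pv_loop_eq (first :: path_parts) PySem.Set.empty []]
  have h : ((first :: path_parts).filter
      (fun p => !(p == "") && !(PySem.Set.contains PySem.Set.empty p)))
      = (first :: path_parts).filter (fun p => !(p == "")) := by
    apply List.filter_congr
    intro q _
    simp [PySem.Set.empty, PySem.Set.contains]
  rw [h]
  simp
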